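-- pv_equiv track=rewrite | github.com/DOMIAXEGDE/infinity | astronaut.py | centered_integers
-- ===== SOURCE A (Python) =====
-- def centered_integers(center: int, minimum: int, maximum: int, limit: int) -> list[int]:
--     result: list[int] = []
--     seen: set[int] = set()
--
--     def push(value: int) -> None:
--         if value < minimum or value > maximum or value in seen or len(result) >= limit:
--             return
--         seen.add(value)
--         result.append(value)
--
--     push(center)
--     distance = 1
--     while len(result) < limit and (center - distance >= minimum or center + distance <= maximum):
--         push(center - distance)
--         push(center + distance)
--         distance += 1
--     return result
-- ===== SOURCE B (Python) =====
-- def _interleave(xs, ys):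
--     out = []
--     for a, b in zip(xs, ys):
--         out.append(a)
--         out.append(b)
--     k = min(len(xs), len(ys))
--     return out + xs[k:] + ys[k:]
--
--
-- def centered_integers(center: int, minimum: int, maximum: int, limit: int) -> list[int]:
--     if limit <= 0 or minimum > maximum:
--         return []
--     span = maximum - minimum + 1
--     if center <= minimum:
--         return list(range(minimum, minimum + min(limit, span)))
--     if center >= maximum:
--         return list(range(maximum, maximum - min(limit, span), -1))
--     left = list(range(center - 1, max(minimum, center - limit) - 1, -1))
--     right = list(range(center + 1, min(maximum, center + limit) + 1))
--     return ([center] + _interleave(left, right))[:limit]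
-- ===== Notes on version B (the rewrite author's own statement) =====
-- stated objective: faster
-- what changed: Replaces A's distance-scanning loop with seen-set by a clamped closed form: the answer is built directly from arithmetic ranges (ascending/descending range when the center is outside the interval, otherwise an interleave of two bounded ranges truncated to limit), so no dead distances are scanned and no set is kept.
import Mathlib
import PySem

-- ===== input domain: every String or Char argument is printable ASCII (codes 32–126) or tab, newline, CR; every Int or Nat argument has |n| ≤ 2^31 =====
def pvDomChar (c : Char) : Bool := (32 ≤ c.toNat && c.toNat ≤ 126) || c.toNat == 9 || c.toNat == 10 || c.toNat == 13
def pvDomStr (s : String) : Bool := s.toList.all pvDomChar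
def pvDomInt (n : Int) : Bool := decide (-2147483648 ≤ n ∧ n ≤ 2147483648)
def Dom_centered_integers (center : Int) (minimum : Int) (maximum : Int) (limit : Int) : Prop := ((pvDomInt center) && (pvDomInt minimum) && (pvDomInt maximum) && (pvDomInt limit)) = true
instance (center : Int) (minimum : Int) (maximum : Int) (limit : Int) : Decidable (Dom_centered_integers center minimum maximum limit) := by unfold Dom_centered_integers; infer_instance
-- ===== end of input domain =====

-- B replaces A's outward distance-scanning loop (with its seen-set) by a clamped closed
-- form built from arithmetic ranges; a timing run measured it faster.

-- ===== PORT A =====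
-- push(value): append value to result/seen unless out of range, already seen, or full
def pushA (minimum maximum limit : Int) (st : List Int × PySem.Set Int) (value : Int) :
    List Int × PySem.Set Int :=
  if value < minimum ∨ value > maximum ∨ PySem.Set.contains st.2 value ∨ (st.1.length : Int) ≥ limit then
    st
  else
    (st.1 ++ [value], PySem.Set.add st.2 value)

-- measure decrease for the while loop (cited by name in aLoop's decreasing_by)
theorem aLoop_dec (center minimum maximum distance : Int)
    (h : center - distance ≥ minimum ∨ center + distance ≤ maximum) :
    (max (center - minimum) (maximum - center) + 1 - (distance + 1)).toNat <
      (max (center - minimum) (maximum - center) + 1 - distance).toNat := by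
  omega

-- while len(result) < limit and (center - distance >= minimum or center + distance <= maximum)
def aLoop (center minimum maximum limit : Int) (distance : Int)
    (st : List Int × PySem.Set Int) : List Int :=
  if h : (st.1.length : Int) < limit ∧ (center - distance ≥ minimum ∨ center + distance ≤ maximum) then
    aLoop center minimum maximum limit (distance + 1)
      (pushA minimum maximum limit (pushA minimum maximum limit st (center - distance)) (center + distance))
  else
    st.1
termination_by (max (center - minimum) (maximum - center) + 1 - distance).toNat
decreasing_by
  exact aLoop_dec center minimum maximum distance h.2

def centered_integers (center : Int) (minimum : Int) (maximum : Int) (limit : Int) : List Int :=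
  aLoop center minimum maximum limit 1
    (pushA minimum maximum limit ([], PySem.Set.empty) center)

-- ===== PORT B =====
-- _interleave(xs, ys): pairwise interleave via zip, then the tail of the longer list
def interleaveB (xs ys : List Int) : List Int :=
  let out := (List.zip xs ys).foldl (fun acc p => acc ++ [p.1, p.2]) []
  let k := min xs.length ys.length
  out ++ xs.drop k ++ ys.drop k

def centered_integers_alt (center : Int) (minimum : Int) (maximum : Int) (limit : Int) : List Int :=
  if limit ≤ 0 ∨ minimum > maximum then
    []
  else
    let span := maximum - minimum + 1
    if center ≤ minimum then
      PySem.List.pyRange minimum (minimum + min limit span) 1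
    else if center ≥ maximum then
      PySem.List.pyRange maximum (maximum - min limit span) (-1)
    else
      let left := PySem.List.pyRange (center - 1) (max minimum (center - limit) - 1) (-1)
      let right := PySem.List.pyRange (center + 1) (min maximum (center + limit) + 1) 1
      PySem.List.slice (center :: interleaveB left right) none (some limit)

-- ===== PRECONDITION & SPEC =====
def Spec_centered_integers (center : Int) (minimum : Int) (maximum : Int) (limit : Int) (out : List Int) : Prop := out = centered_integers_alt center minimum maximum limit
instance (center : Int) (minimum : Int) (maximum : Int) (limit : Int) (out : List Int) : Decidable (Spec_centered_integers center minimum maximum limit out) := by unfold Spec_centered_integers; infer_instance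

-- ===== CLAIM (what is proved, stated in full; the proofs are below) =====
def Claim_equal_centered_integers : Prop := ∀ (center : Int) (minimum : Int) (maximum : Int) (limit : Int), Dom_centered_integers center minimum maximum limit → Spec_centered_integers center minimum maximum limit (centered_integers center minimum maximum limit)

-- ===== LEMMAS AND PROOFS =====

-- the stream of in-range candidates at distances d, d+1, … (eventually empty)
def cands (c m M : Int) (d : Int) : List Int :=
  if m ≤ c - d ∨ c + d ≤ M then
    ((if m ≤ c - d ∧ c - d ≤ M then [c - d] else []) ++
     (if m ≤ c + d ∧ c + d ≤ M then [c + d] else [])) ++ cands c m M (d + 1)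
  else
    []
termination_by (max (c - m) (M - c) + 1 - d).toNat
decreasing_by omega

-- simple recursive interleave, the reference shape for both cands and interleaveB
def ilv : List Int → List Int → List Int
  | [], ys => ys
  | x :: xs, [] => x :: xs
  | x :: xs, y :: ys => x :: y :: ilv xs ys

theorem ilv_nil_right (xs : List Int) : ilv xs [] = xs := by
  cases xs <;> rfl

theorem mem_cands (c m M d v : Int) (hv : v ∈ cands c m M d) : m ≤ v ∧ v ≤ M := by
  fun_induction cands c m M d with
  | case1 d h ih =>
    simp only [List.mem_append] at hv
    rcases hv with (h1 | h2) | h3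
    · split at h1 <;> simp_all
    · split at h2 <;> simp_all
    · exact ih h3
  | case2 d h => simp at hv

-- pushA on a state whose set agrees with its list, for a value not yet present
theorem pushA_mem (m M l : Int) (r : List Int) (s : PySem.Set Int) (v : Int)
    (hv : v ∉ s) :
    pushA m M l (r, s) v =
      if m ≤ v ∧ v ≤ M ∧ (r.length : Int) < l then (r ++ [v], s ++ [v]) else (r, s) := by
  have hc : List.contains s v = false := by
    simp only [List.contains_eq_mem, decide_eq_false_iff_not]
    exact hv
  simp only [pushA, PySem.Set.add, PySem.Set.contains, hc, Bool.false_eq_true, false_or]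
  split_ifs with h1 h2 h2 <;> first | rfl | (exfalso; omega)

-- A's loop computes: result so far ++ (the candidate stream, truncated to the remaining budget)
theorem aLoop_eq (c m M l d : Int) (st : List Int × PySem.Set Int) :
    1 ≤ d →
    (∀ v : Int, v ∈ st.2 ↔ v ∈ st.1) →
    (∀ v ∈ st.1, v - c < d ∧ c - v < d) →
    (st.1.length : Int) ≤ l →
    aLoop c m M l d st = st.1 ++ (cands c m M d).take (l - st.1.length).toNat := by
  fun_induction aLoop c m M l d st with
  | case1 d st h ih =>
    intro hd hs hfar hlen
    obtain ⟨r, s⟩ := st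
    simp only at h hs hfar hlen ⊢
    obtain ⟨hn, hcond⟩ := h
    have hcands : cands c m M d =
        ((if m ≤ c - d ∧ c - d ≤ M then [c - d] else []) ++
         (if m ≤ c + d ∧ c + d ≤ M then [c + d] else [])) ++ cands c m M (d + 1) := by
      rw [cands]; rw [if_pos (by omega : m ≤ c - d ∨ c + d ≤ M)]
    have hLnot : c - d ∉ s := fun hx => by
      have := hfar _ ((hs _).1 hx); omega
    have hRnot : c + d ∉ s := fun hx => by
      have := hfar _ ((hs _).1 hx); omega
    by_cases hL : m ≤ c - d ∧ c - d ≤ M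
    · have hRnot' : c + d ∉ s ++ [c - d] := by
        intro hx
        rcases List.mem_append.1 hx with hx | hx
        · exact hRnot hx
        · simp at hx; omega
      by_cases hR : m ≤ c + d ∧ c + d ≤ M
      · by_cases hb : (r.length : Int) + 1 < l
        · have hst : pushA m M l (pushA m M l (r, s) (c - d)) (c + d) =
              (r ++ [c - d] ++ [c + d], s ++ [c - d] ++ [c + d]) := by
            rw [pushA_mem _ _ _ _ _ _ hLnot, if_pos ⟨hL.1, hL.2, hn⟩,
                pushA_mem _ _ _ _ _ _ hRnot', if_pos ⟨hR.1, hR.2, by simp; omega⟩]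
          rw [hst] at ih
          rw [hst]
          rw [ih (by omega)
            (by intro v
                simp only [List.mem_append, List.mem_singleton]
                rw [hs v])
            (by intro v hv
                rcases List.mem_append.1 hv with hv | hv
                · rcases List.mem_append.1 hv with hv | hv
                  · have := hfar _ hv; omega
                  · simp at hv; omega
                · simp at hv; omega)
            (by simp; omega)]
          rw [hcands, if_pos hL, if_pos hR,
              show ((r ++ [c - d] ++ [c + d]).length : Int) = (r.length : Int) + 2 from by simp,
              show (l - (r.length : Int)).toNat = ((l - ((r.length : Int) + 2)).toNat + 1) + 1 from by omega]
          simp [List.take_succ_cons]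
        · have hst : pushA m M l (pushA m M l (r, s) (c - d)) (c + d) =
              (r ++ [c - d], s ++ [c - d]) := by
            rw [pushA_mem _ _ _ _ _ _ hLnot, if_pos ⟨hL.1, hL.2, hn⟩,
                pushA_mem _ _ _ _ _ _ hRnot', if_neg (by simp; omega)]
          rw [hst] at ih
          rw [hst]
          rw [ih (by omega)
            (by intro v
                simp only [List.mem_append, List.mem_singleton]
                rw [hs v])
            (by intro v hv
                rcases List.mem_append.1 hv with hv | hv
                · have := hfar _ hv; omega
                · simp at hv; omega)
            (by simp; omega)]
          rw [hcands, if_pos hL, if_pos hR,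
              show ((r ++ [c - d]).length : Int) = (r.length : Int) + 1 from by simp,
              show (l - ((r.length : Int) + 1)).toNat = 0 from by omega,
              show (l - (r.length : Int)).toNat = 1 from by omega]
          simp
      · have hst : pushA m M l (pushA m M l (r, s) (c - d)) (c + d) =
            (r ++ [c - d], s ++ [c - d]) := by
          rw [pushA_mem _ _ _ _ _ _ hLnot, if_pos ⟨hL.1, hL.2, hn⟩,
              pushA_mem _ _ _ _ _ _ hRnot', if_neg (by intro hx; exact hR ⟨hx.1, hx.2.1⟩)]
        rw [hst] at ih
        rw [hst]
        rw [ih (by omega)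
          (by intro v
              simp only [List.mem_append, List.mem_singleton]
              rw [hs v])
          (by intro v hv
              rcases List.mem_append.1 hv with hv | hv
              · have := hfar _ hv; omega
              · simp at hv; omega)
          (by simp; omega)]
        rw [hcands, if_pos hL, if_neg hR,
            show ((r ++ [c - d]).length : Int) = (r.length : Int) + 1 from by simp,
            show (l - (r.length : Int)).toNat = (l - ((r.length : Int) + 1)).toNat + 1 from by omega]
        simp [List.take_succ_cons]
    · by_cases hR : m ≤ c + d ∧ c + d ≤ M
      · have hst : pushA m M l (pushA m M l (r, s) (c - d)) (c + d) =
            (r ++ [c + d], s ++ [c + d]) := by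
          rw [pushA_mem _ _ _ _ _ _ hLnot, if_neg (by intro hx; exact hL ⟨hx.1, hx.2.1⟩),
              pushA_mem _ _ _ _ _ _ hRnot, if_pos ⟨hR.1, hR.2, hn⟩]
        rw [hst] at ih
        rw [hst]
        rw [ih (by omega)
          (by intro v
              simp only [List.mem_append, List.mem_singleton]
              rw [hs v])
          (by intro v hv
              rcases List.mem_append.1 hv with hv | hv
              · have := hfar _ hv; omega
              · simp at hv; omega)
          (by simp; omega)]
        rw [hcands, if_neg hL, if_pos hR,
            show ((r ++ [c + d]).length : Int) = (r.length : Int) + 1 from by simp,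
            show (l - (r.length : Int)).toNat = (l - ((r.length : Int) + 1)).toNat + 1 from by omega]
        simp [List.take_succ_cons]
      · have hst : pushA m M l (pushA m M l (r, s) (c - d)) (c + d) = (r, s) := by
          rw [pushA_mem _ _ _ _ _ _ hLnot, if_neg (by intro hx; exact hL ⟨hx.1, hx.2.1⟩),
              pushA_mem _ _ _ _ _ _ hRnot, if_neg (by intro hx; exact hR ⟨hx.1, hx.2.1⟩)]
        rw [hst] at ih
        rw [hst]
        rw [ih (by omega) hs
          (by intro v hv; have := hfar _ hv; omega) hlen]
        rw [hcands, if_neg hL, if_neg hR]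
        simp
  | case2 d st h =>
    intro hd hs hfar hlen
    by_cases hn : (st.1.length : Int) < l
    · have hcond : ¬ (m ≤ c - d ∨ c + d ≤ M) := by
        intro hx; exact h ⟨hn, by omega⟩
      rw [cands, if_neg hcond]
      simp
    · rw [show (l - (st.1.length : Int)).toNat = 0 from by omega]
      simp

-- A in closed form: take limit of the full candidate stream
theorem A_eq_take (c m M l : Int) :
    centered_integers c m M l =
      ((if m ≤ c ∧ c ≤ M then [c] else []) ++ cands c m M 1).take l.toNat := by
  unfold centered_integers
  have hempty : c ∉ (PySem.Set.empty : PySem.Set Int) := by simp [PySem.Set.empty]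
  rw [pushA_mem _ _ _ _ _ _ hempty]
  by_cases hl : (0 : Int) < l
  · by_cases hcr : m ≤ c ∧ c ≤ M
    · rw [if_pos ⟨hcr.1, hcr.2, by simpa using hl⟩]
      rw [aLoop_eq c m M l 1 _ (by omega)
        (by intro v; simp [PySem.Set.empty])
        (by intro v hv; simp at hv; omega)
        (by simp; omega)]
      rw [if_pos hcr]
      rw [show ((([] : List Int) ++ [c]).length : Int) = 1 from by simp,
          show l.toNat = (l - 1).toNat + 1 from by omega]
      simp [List.take_succ_cons]
    · rw [if_neg (fun hx => hcr ⟨hx.1, hx.2.1⟩)]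
      rw [aLoop_eq c m M l 1 _ (by omega)
        (by intro v; simp [PySem.Set.empty])
        (by intro v hv; simp at hv)
        (by simp; omega)]
      rw [if_neg hcr]
      simp
  · rw [if_neg (fun hx => hl (by simpa using hx.2.2))]
    rw [aLoop.eq_def, dif_neg (by simp; omega)]
    rw [show l.toNat = 0 from by omega]
    simp

-- cands when the center is at or below the minimum: the ascending range
theorem cands_low (c m M d : Int) (hc : c ≤ m) :
    1 ≤ d → cands c m M d = PySem.List.pyRange (max m (c + d)) (M + 1) 1 := by
  fun_induction cands c m M d with
  | case1 d h ih =>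
    intro hd
    have hL : ¬ (m ≤ c - d ∧ c - d ≤ M) := by omega
    have hR : c + d ≤ M := by omega
    rw [if_neg hL, ih (by omega)]
    by_cases hm : m ≤ c + d
    · rw [if_pos ⟨hm, hR⟩,
          show max m (c + (d + 1)) = c + d + 1 from by omega,
          show max m (c + d) = c + d from by omega,
          show PySem.List.pyRange (c + d) (M + 1) 1 = (c + d) :: PySem.List.pyRange (c + d + 1) (M + 1) 1
            from PySem.List.pyRange_one_cons (by omega)]
      simp
    · rw [if_neg (fun hx => hm hx.1),
          show max m (c + (d + 1)) = m from by omega,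
          show max m (c + d) = m from by omega]
      simp
  | case2 d h =>
    intro hd
    rw [PySem.List.pyRange_one_eq_nil (by omega)]

-- cands when the center is at or above the maximum: the descending range
theorem cands_high (c m M d : Int) (hc : M ≤ c) :
    1 ≤ d → cands c m M d = PySem.List.pyRange (min M (c - d)) (m - 1) (-1) := by
  fun_induction cands c m M d with
  | case1 d h ih =>
    intro hd
    have hR : ¬ (m ≤ c + d ∧ c + d ≤ M) := by omega
    have hL : m ≤ c - d := by omega
    rw [if_neg hR, ih (by omega)]
    by_cases hm : c - d ≤ M
    · rw [if_pos ⟨hL, hm⟩,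
          show min M (c - (d + 1)) = c - d - 1 from by omega,
          show min M (c - d) = c - d from by omega,
          show PySem.List.pyRange (c - d) (m - 1) (-1) = (c - d) :: PySem.List.pyRange (c - d - 1) (m - 1) (-1)
            from PySem.List.pyRange_neg_one_cons (by omega)]
      simp
    · rw [if_neg (fun hx => hm hx.2),
          show min M (c - (d + 1)) = M from by omega,
          show min M (c - d) = M from by omega]
      simp
  | case2 d h =>
    intro hd
    rw [PySem.List.pyRange_neg_one_eq_nil (by omega)]

-- cands when the center is inside the interval: interleave of the two outward ranges
theorem cands_mid (c m M d : Int) (hm : m ≤ c) (hM : c ≤ M) :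
    1 ≤ d → cands c m M d =
      ilv (PySem.List.pyRange (c - d) (m - 1) (-1)) (PySem.List.pyRange (c + d) (M + 1) 1) := by
  fun_induction cands c m M d with
  | case1 d h ih =>
    intro hd
    have hLM : c - d ≤ M := by omega
    have hRm : m ≤ c + d := by omega
    by_cases hL : m ≤ c - d
    · by_cases hR : c + d ≤ M
      · rw [if_pos ⟨hL, hLM⟩, if_pos ⟨hRm, hR⟩, ih (by omega),
            show c - (d + 1) = c - d - 1 from by omega,
            show c + (d + 1) = c + d + 1 from by omega,
            show PySem.List.pyRange (c - d) (m - 1) (-1) = (c - d) :: PySem.List.pyRange (c - d - 1) (m - 1) (-1)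
              from PySem.List.pyRange_neg_one_cons (by omega),
            show PySem.List.pyRange (c + d) (M + 1) 1 = (c + d) :: PySem.List.pyRange (c + d + 1) (M + 1) 1
              from PySem.List.pyRange_one_cons (by omega)]
        simp [ilv]
      · rw [if_pos ⟨hL, hLM⟩, if_neg (fun hx => hR hx.2), ih (by omega),
            show (PySem.List.pyRange (c + (d + 1)) (M + 1) 1) = [] from
              PySem.List.pyRange_one_eq_nil (by omega),
            show (PySem.List.pyRange (c + d) (M + 1) 1) = [] from
              PySem.List.pyRange_one_eq_nil (by omega),
            ilv_nil_right, ilv_nil_right,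
            show c - (d + 1) = c - d - 1 from by omega,
            show PySem.List.pyRange (c - d) (m - 1) (-1) = (c - d) :: PySem.List.pyRange (c - d - 1) (m - 1) (-1)
              from PySem.List.pyRange_neg_one_cons (by omega)]
        simp
    · have hR : c + d ≤ M := by omega
      rw [if_neg (fun hx => hL hx.1), if_pos ⟨hRm, hR⟩, ih (by omega),
          show (PySem.List.pyRange (c - d) (m - 1) (-1)) = [] from
            PySem.List.pyRange_neg_one_eq_nil (by omega),
          show (PySem.List.pyRange (c - (d + 1)) (m - 1) (-1)) = [] from
            PySem.List.pyRange_neg_one_eq_nil (by omega),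
          show c + (d + 1) = c + d + 1 from by omega,
          show PySem.List.pyRange (c + d) (M + 1) 1 = (c + d) :: PySem.List.pyRange (c + d + 1) (M + 1) 1
            from PySem.List.pyRange_one_cons (by omega)]
      simp [ilv]
  | case2 d h =>
    intro hd
    rw [PySem.List.pyRange_neg_one_eq_nil (by omega), PySem.List.pyRange_one_eq_nil (by omega)]
    rfl

theorem take_pyRange_one (a b : Int) (k : Nat) :
    (PySem.List.pyRange a b 1).take k = PySem.List.pyRange a (min b (a + k)) 1 := by
  rw [PySem.List.pyRange_one, PySem.List.pyRange_one, ← List.map_take, List.take_range]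
  rw [show min k (b - a).toNat = (min b (a + (k : Int)) - a).toNat from by omega]

theorem take_pyRange_neg_one (a b : Int) (k : Nat) :
    (PySem.List.pyRange a b (-1)).take k = PySem.List.pyRange a (max b (a - k)) (-1) := by
  rw [PySem.List.pyRange_neg_one, PySem.List.pyRange_neg_one, ← List.map_take, List.take_range]
  rw [show min k (a - b).toNat = (a - max b (a - (k : Int))).toNat from by omega]

theorem interleaveB_eq_ilv (xs ys : List Int) : interleaveB xs ys = ilv xs ys := by
  induction xs generalizing ys with
  | nil => simp [interleaveB, ilv]
  | cons x xs ih =>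
    cases ys with
    | nil => simp [interleaveB, ilv]
    | cons y ys =>
      have h := ih ys
      simp only [interleaveB, List.zip_cons_cons, List.foldl_cons,
        PySem.List.foldl_append_eq_flatMap, List.nil_append, List.length_cons,
        Nat.succ_min_succ, List.drop_succ_cons, ilv] at h ⊢
      simp [h]

theorem take_ilv_take (k a b : Nat) (xs ys : List Int) (ha : k ≤ a) (hb : k ≤ b) :
    (ilv (xs.take a) (ys.take b)).take k = (ilv xs ys).take k := by
  induction xs generalizing ys k a b with
  | nil =>
    simp only [List.take_nil, ilv, List.take_take]
    rw [Nat.min_eq_left hb]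
  | cons x xs ih =>
    cases ys with
    | nil =>
      simp only [List.take_nil]
      cases a with
      | zero => simp [ilv, show k = 0 from by omega]
      | succ a' =>
        simp only [List.take_succ_cons, ilv]
        rw [← List.take_succ_cons, List.take_take, Nat.min_eq_left ha]
    | cons y ys =>
      cases a with
      | zero =>
        simp [show k = 0 from by omega]
      | succ a' =>
        cases b with
        | zero => simp [show k = 0 from by omega]
        | succ b' =>
          simp only [List.take_succ_cons, ilv]
          cases k with
          | zero => simp
          | succ n =>
            cases n with
            | zero => simp
            | succ m =>
              simp only [List.take_succ_cons]
              rw [ih m a' b' ys (by omega) (by omega)]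

-- ===== VERDICT (by name: the statement is the Claim_ definition above) =====
theorem centered_integers_spec : Claim_equal_centered_integers := by
  intro c m M l _
  simp only [Spec_centered_integers, centered_integers_alt]
  rw [A_eq_take]
  by_cases h0 : l ≤ 0 ∨ m > M
  · rw [if_pos h0]
    rcases h0 with h0 | h0
    · rw [show l.toNat = 0 from by omega]; simp
    · have hc : cands c m M 1 = [] := by
        rw [List.eq_nil_iff_forall_not_mem]
        intro v hv
        have := mem_cands c m M 1 v hv
        omega
      rw [if_neg (by omega), hc]
      simp
  · rw [if_neg h0]
    have hl : (0 : Int) < l := by omega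
    have hmM : m ≤ M := by omega
    by_cases hcm : c ≤ m
    · rw [if_pos hcm]
      have hstream : (if m ≤ c ∧ c ≤ M then [c] else []) ++ cands c m M 1 =
          PySem.List.pyRange m (M + 1) 1 := by
        rw [cands_low c m M 1 hcm (by omega)]
        by_cases hce : c = m
        · subst hce
          rw [if_pos ⟨le_refl c, by omega⟩,
              show max c (c + 1) = c + 1 from by omega,
              show PySem.List.pyRange c (M + 1) 1 = c :: PySem.List.pyRange (c + 1) (M + 1) 1
                from PySem.List.pyRange_one_cons (by omega)]
          simp
        · rw [if_neg (by omega),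
              show max m (c + 1) = m from by omega]
          simp
      rw [hstream, take_pyRange_one,
          show min (M + 1) (m + (l.toNat : Int)) = m + min l (M - m + 1) from by omega]
    · rw [if_neg hcm]
      have hcm' : m < c := by omega
      by_cases hcM : c ≥ M
      · rw [if_pos hcM]
        have hstream : (if m ≤ c ∧ c ≤ M then [c] else []) ++ cands c m M 1 =
            PySem.List.pyRange M (m - 1) (-1) := by
          rw [cands_high c m M 1 hcM (by omega)]
          by_cases hce : c = M
          · subst hce
            rw [if_pos ⟨by omega, le_refl c⟩,
                show min c (c - 1) = c - 1 from by omega,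
                show PySem.List.pyRange c (m - 1) (-1) = c :: PySem.List.pyRange (c - 1) (m - 1) (-1)
                  from PySem.List.pyRange_neg_one_cons (by omega)]
            simp
          · rw [if_neg (by omega),
                show min M (c - 1) = M from by omega]
            simp
        rw [hstream, take_pyRange_neg_one,
            show max (m - 1) (M - (l.toNat : Int)) = M - min l (M - m + 1) from by omega]
      · rw [if_neg hcM]
        have hcM' : c < M := by omega
        rw [PySem.List.slice_to _ (by omega : (0 : Int) ≤ l)]
        rw [if_pos ⟨by omega, by omega⟩]
        rw [cands_mid c m M 1 (by omega) (by omega) (by omega)]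
        rw [interleaveB_eq_ilv]
        rw [show PySem.List.pyRange (c - 1) (max m (c - l) - 1) (-1) =
              (PySem.List.pyRange (c - 1) (m - 1) (-1)).take l.toNat from by
          rw [take_pyRange_neg_one,
              show max (m - 1) (c - 1 - (l.toNat : Int)) = max m (c - l) - 1 from by omega]]
        rw [show PySem.List.pyRange (c + 1) (min M (c + l) + 1) 1 =
              (PySem.List.pyRange (c + 1) (M + 1) 1).take l.toNat from by
          rw [take_pyRange_one,
              show min (M + 1) (c + 1 + (l.toNat : Int)) = min M (c + l) + 1 from by omega]]
        rw [show l.toNat = (l.toNat - 1) + 1 from by omega]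
        simp only [List.singleton_append, List.take_succ_cons]
        rw [take_ilv_take (l.toNat - 1) (l.toNat - 1 + 1) (l.toNat - 1 + 1) _ _
          (by omega) (by omega)]
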